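-- pv_equiv track=rewrite | github.com/JGBurgess1/Genomics_Programs | Python_for_Genomic_Data_Science/Exam_1.py | get_shortest
-- ===== SOURCE A (Python) =====
-- def get_shortest(start, dict):
--     short_key = ""
--     num_this_size = 0
--     for key, value in dict.items():
--         length = len(value)
--         if length < start:
--             start = length
--             short_key = key
--             num_this_size = 1
--         elif length == start:
--             num_this_size += 1
--     return short_key, num_this_size, start #, dict.get(short_key)""
-- ===== SOURCE B (Python) =====
-- def get_shortest(start, dict):
--     if not dict:
--         return ("", 0, start)
--     m = min(len(v) for v in dict.values())
--     final = min(start, m)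
--     num = sum(1 for v in dict.values() if len(v) == final)
--     short_key = next((k for k, v in dict.items() if len(v) == final), "") if m < start else ""
--     return (short_key, num, final)
-- ===== Notes on version B (the rewrite author's own statement) =====
-- stated objective: simpler
-- what changed: Replaces the single running-minimum scan with a declarative decomposition: take the min of the value lengths, cap it with start, count ties with a sum, and locate the first matching key only when the minimum beats start.
import Mathlib
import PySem

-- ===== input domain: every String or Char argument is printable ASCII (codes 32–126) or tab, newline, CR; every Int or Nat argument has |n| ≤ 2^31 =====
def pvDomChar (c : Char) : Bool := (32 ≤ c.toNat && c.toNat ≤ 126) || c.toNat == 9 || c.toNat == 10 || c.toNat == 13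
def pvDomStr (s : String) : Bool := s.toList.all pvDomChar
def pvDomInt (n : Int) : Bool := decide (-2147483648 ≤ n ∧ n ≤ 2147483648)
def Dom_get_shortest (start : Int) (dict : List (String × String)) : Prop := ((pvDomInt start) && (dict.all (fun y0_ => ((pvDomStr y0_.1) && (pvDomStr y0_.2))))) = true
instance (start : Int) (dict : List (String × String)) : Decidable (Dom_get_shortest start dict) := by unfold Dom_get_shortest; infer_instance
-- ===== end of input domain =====

-- B replaces A's single running-minimum scan by a declarative min / count / find decomposition (objective: simpler).

-- ===== PORT A =====
-- the for-loop of A, as structural recursion over the items with the loop state (short_key, num_this_size, start)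
def get_shortest_go (items : List (String × String)) (short_key : String) (num_this_size : Int) (start : Int) : String × Int × Int :=
  match items with
  | [] => (short_key, num_this_size, start)
  | (key, value) :: rest =>
    let length := PySem.Str.len value
    if length < start then get_shortest_go rest key 1 length
    else if length = start then get_shortest_go rest short_key (num_this_size + 1) start
    else get_shortest_go rest short_key num_this_size start

def get_shortest (start : Int) (dict : List (String × String)) : String × Int × Int :=
  get_shortest_go dict "" 0 start

-- ===== PORT B =====
def get_shortest_alt (start : Int) (dict : List (String × String)) : String × Int × Int :=
  match dict with
  | [] => ("", 0, start)
  | p :: rest =>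
    let m := (rest.map (fun q => PySem.Str.len q.2)).foldl min (PySem.Str.len p.2)
    let final := min start m
    let num : Int := ((p :: rest).filter (fun q => PySem.Str.len q.2 == final)).length
    let short_key := if m < start then
        (((p :: rest).find? (fun q => PySem.Str.len q.2 == final)).map Prod.fst).getD ""
      else ""
    (short_key, num, final)

-- ===== PRECONDITION & SPEC =====
def Spec_get_shortest (start : Int) (dict : List (String × String)) (out : String × Int × Int) : Prop := out = get_shortest_alt start dict
instance (start : Int) (dict : List (String × String)) (out : String × Int × Int) : Decidable (Spec_get_shortest start dict out) := by unfold Spec_get_shortest; infer_instance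

-- ===== CLAIM (what is proved, stated in full; the proofs are below) =====
def Claim_equal_get_shortest : Prop := ∀ (start : Int) (dict : List (String × String)), Dom_get_shortest start dict → Spec_get_shortest start dict (get_shortest start dict)

-- ===== LEMMAS AND PROOFS =====

-- running minimum of the value lengths, seeded with the current start
def pvFm (l : List (String × String)) (st : Int) : Int :=
  (l.map (fun q => PySem.Str.len q.2)).foldl min st

def pvCnt (l : List (String × String)) (x : Int) : Int :=
  ((l.filter (fun q => PySem.Str.len q.2 == x)).length : Int)

def pvKey (l : List (String × String)) (x : Int) : String :=
  (((l.find? (fun q => PySem.Str.len q.2 == x))).map Prod.fst).getD ""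

theorem pvFm_cons (p : String × String) (l : List (String × String)) (st : Int) :
    pvFm (p :: l) st = pvFm l (min st (PySem.Str.len p.2)) := by
  simp [pvFm]

theorem pvFm_le (l : List (String × String)) (st : Int) : pvFm l st ≤ st := by
  induction l generalizing st with
  | nil => simp [pvFm]
  | cons p rest ih =>
    calc pvFm (p :: rest) st = pvFm rest (min st (PySem.Str.len p.2)) := pvFm_cons ..
    _ ≤ min st (PySem.Str.len p.2) := ih _
    _ ≤ st := min_le_left _ _

theorem pvFm_min (l : List (String × String)) (a b : Int) :
    pvFm l (min a b) = min a (pvFm l b) := by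
  induction l generalizing b with
  | nil => simp [pvFm]
  | cons p rest ih =>
    simp only [pvFm_cons, min_assoc]
    exact ih _

theorem pvKey_cons (k v : String) (l : List (String × String)) (x : Int) :
    pvKey ((k, v) :: l) x = if PySem.Str.len v = x then k else pvKey l x := by
  unfold pvKey
  rw [List.find?_cons]
  by_cases h : PySem.Str.len v = x
  · rw [if_pos h]
    rw [show (PySem.Str.len ((k, v) : String × String).2 == x) = true by simpa using h]
    rfl
  · rw [if_neg h]
    rw [show (PySem.Str.len ((k, v) : String × String).2 == x) = false by simpa using h]

theorem pvCnt_cons (k v : String) (l : List (String × String)) (x : Int) :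
    pvCnt ((k, v) :: l) x = (if PySem.Str.len v = x then 1 else 0) + pvCnt l x := by
  unfold pvCnt
  rw [List.filter_cons]
  by_cases h : PySem.Str.len v = x
  · rw [if_pos (show (PySem.Str.len ((k, v) : String × String).2 == x) = true by
        simpa using h), if_pos h, List.length_cons]
    push_cast
    ring
  · rw [if_neg (show ¬ (PySem.Str.len ((k, v) : String × String).2 == x) = true by
        simpa using h), if_neg h, zero_add]

-- the loop invariant: the result of A's loop from an arbitrary state, in B's vocabulary
theorem get_shortest_go_eq (l : List (String × String)) (sk : String) (num st : Int) :
    get_shortest_go l sk num st =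
      ((if pvFm l st < st then pvKey l (pvFm l st) else sk),
       (if pvFm l st < st then 0 else num) + pvCnt l (pvFm l st),
       pvFm l st) := by
  induction l generalizing sk num st with
  | nil => simp [get_shortest_go, pvFm, pvCnt]
  | cons p rest ih =>
    obtain ⟨key, value⟩ := p
    have hf : pvFm ((key, value) :: rest) st = pvFm rest (min st (PySem.Str.len value)) :=
      pvFm_cons (key, value) rest st
    by_cases h1 : PySem.Str.len value < st
    · have hmin : min st (PySem.Str.len value) = PySem.Str.len value := by omega
      have hle : pvFm rest (PySem.Str.len value) ≤ PySem.Str.len value := pvFm_le ..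
      rw [show get_shortest_go ((key, value) :: rest) sk num st
            = get_shortest_go rest key 1 (PySem.Str.len value) by
          simp only [get_shortest_go]; rw [if_pos h1]]
      rw [ih, hf, hmin, pvKey_cons, pvCnt_cons]
      by_cases h2 : pvFm rest (PySem.Str.len value) < PySem.Str.len value
      · have hlt : pvFm rest (PySem.Str.len value) < st := by omega
        rw [if_pos h2, if_pos hlt, if_pos h2, if_pos hlt,
            if_neg (by omega : ¬ PySem.Str.len value = pvFm rest (PySem.Str.len value))]
        simp only [Prod.mk.injEq, and_true, true_and]
        omega
      · have heq : pvFm rest (PySem.Str.len value) = PySem.Str.len value := by omega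
        have hlt : pvFm rest (PySem.Str.len value) < st := by omega
        rw [if_neg h2, if_pos hlt, if_neg h2, if_pos hlt, if_pos heq.symm]
        simp only [Prod.mk.injEq, and_true, true_and]
        omega
    · have hmin : min st (PySem.Str.len value) = st := by omega
      have hle : pvFm rest st ≤ st := pvFm_le ..
      by_cases h2 : PySem.Str.len value = st
      · rw [show get_shortest_go ((key, value) :: rest) sk num st
              = get_shortest_go rest sk (num + 1) st by
            simp only [get_shortest_go]; rw [if_neg h1, if_pos h2]]
        rw [ih, hf, hmin, pvKey_cons, pvCnt_cons]
        by_cases h3 : pvFm rest st < st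
        · rw [if_pos h3, if_pos h3, if_pos h3, if_pos h3,
              if_neg (by omega : ¬ PySem.Str.len value = pvFm rest st)]
          simp only [Prod.mk.injEq, and_true, true_and]
          omega
        · have heq : pvFm rest st = st := by omega
          rw [if_neg h3, if_neg h3, if_neg h3, if_neg h3,
              if_pos (by omega : PySem.Str.len value = pvFm rest st)]
          simp only [Prod.mk.injEq, and_true, true_and]
          omega
      · rw [show get_shortest_go ((key, value) :: rest) sk num st
              = get_shortest_go rest sk num st by
            simp only [get_shortest_go]; rw [if_neg h1, if_neg h2]]
        rw [ih, hf, hmin, pvKey_cons, pvCnt_cons,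
            if_neg (by omega : ¬ PySem.Str.len value = pvFm rest st)]
        simp only [Prod.mk.injEq, and_true, true_and]
        omega

-- ===== VERDICT (by name: the statement is the Claim_ definition above) =====
theorem get_shortest_spec : Claim_equal_get_shortest := by
  intro start dict _
  unfold Spec_get_shortest get_shortest
  rw [get_shortest_go_eq]
  cases dict with
  | nil => simp [get_shortest_alt, pvFm, pvCnt]
  | cons p rest =>
    simp only [get_shortest_alt]
    set m := (rest.map (fun q => PySem.Str.len q.2)).foldl min (PySem.Str.len p.2) with hm
    have hf : pvFm (p :: rest) start = min start m := by
      rw [hm, pvFm_cons, pvFm_min]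
      rfl
    have hiff : pvFm (p :: rest) start < start ↔ m < start := by
      rw [hf]; omega
    by_cases h : m < start
    · have h1 : pvFm (p :: rest) start < start := hiff.mpr h
      simp [h, hf, pvKey, pvCnt]
    · have h1 : ¬ pvFm (p :: rest) start < start := fun hh => h (hiff.mp hh)
      simp [h, hf, pvCnt]
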